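-- pv_equiv track=rewrite | github.com/subidhkhanal/job-search-tool | resume_tailor.py | suggest_skill_order
-- ===== SOURCE A (Python) =====
-- RESUME_SKILLS = [
--     "LangChain", "RAG Pipelines", "Agentic AI", "Hybrid Search",
--     "RAGAS", "Python", "FastAPI", "REST APIs", "Web Scraping",
--     "Automation Pipelines", "Next.js", "Tailwind CSS", "ChromaDB",
--     "SQL", "Git", "OpenAI", "Cohere",
-- ]
--
-- def suggest_skill_order(jd_text):
--     """Reorder resume skills so the most JD-relevant appear first."""
--     jd_lower = jd_text.lower()
--
--     relevant = []
--     other = []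
--
--     for skill in RESUME_SKILLS:
--         if skill.lower() in jd_lower:
--             relevant.append(skill)
--         else:
--             other.append(skill)
--
--     return relevant + other
-- ===== SOURCE B (Python) =====
-- RESUME_SKILLS = [
--     "LangChain", "RAG Pipelines", "Agentic AI", "Hybrid Search",
--     "RAGAS", "Python", "FastAPI", "REST APIs", "Web Scraping",
--     "Automation Pipelines", "Next.js", "Tailwind CSS", "ChromaDB",
--     "SQL", "Git", "OpenAI", "Cohere",
-- ]
--
-- def suggest_skill_order(jd_text):
--     """Reorder resume skills so the most JD-relevant appear first."""
--     jd_lower = jd_text.lower()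
--     return sorted(RESUME_SKILLS, key=lambda s: s.lower() not in jd_lower)
-- ===== Notes on version B (the rewrite author's own statement) =====
-- stated objective: idiomatic
-- what changed: Replaces the explicit relevant/other accumulator loop and list concatenation with a single stable sort over RESUME_SKILLS keyed on whether the lowercased skill is absent from the lowercased JD text, relying on sort stability to keep each group's original order.
import Mathlib
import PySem

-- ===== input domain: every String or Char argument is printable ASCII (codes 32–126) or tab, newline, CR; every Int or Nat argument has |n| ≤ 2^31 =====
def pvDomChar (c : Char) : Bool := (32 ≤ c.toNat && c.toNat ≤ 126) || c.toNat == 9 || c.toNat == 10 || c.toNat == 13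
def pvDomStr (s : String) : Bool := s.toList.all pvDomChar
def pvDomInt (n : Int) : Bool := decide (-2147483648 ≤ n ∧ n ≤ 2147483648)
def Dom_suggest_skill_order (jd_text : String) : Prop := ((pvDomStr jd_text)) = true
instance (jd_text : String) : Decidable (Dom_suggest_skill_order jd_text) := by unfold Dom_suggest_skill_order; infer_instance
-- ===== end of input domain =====

-- B replaces A's explicit relevant/other partition loop with one stable sort of the fixed
-- skills list keyed on the boolean "not mentioned in the JD" (idiomatic; same result).


def RESUME_SKILLS : List String :=
  ["LangChain", "RAG Pipelines", "Agentic AI", "Hybrid Search",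
   "RAGAS", "Python", "FastAPI", "REST APIs", "Web Scraping",
   "Automation Pipelines", "Next.js", "Tailwind CSS", "ChromaDB",
   "SQL", "Git", "OpenAI", "Cohere"]

-- ===== PORT A =====
-- the for-loop with the two accumulators 'relevant'/'other', then 'relevant + other'
def suggest_skill_order (jd_text : String) : List String :=
  let jd_lower := PySem.Str.lower jd_text
  let acc := RESUME_SKILLS.foldl
    (fun acc skill =>
      if PySem.Str.isIn (PySem.Str.lower skill) jd_lower then (acc.1 ++ [skill], acc.2)
      else (acc.1, acc.2 ++ [skill]))
    ([], [])
  acc.1 ++ acc.2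

-- ===== PORT B =====
-- sorted(RESUME_SKILLS, key=lambda s: s.lower() not in jd_lower); False < True
def suggest_skill_order_alt (jd_text : String) : List String :=
  let jd_lower := PySem.Str.lower jd_text
  PySem.List.sorted RESUME_SKILLS (fun s => !(PySem.Str.isIn (PySem.Str.lower s) jd_lower))

-- ===== PRECONDITION & SPEC =====
def Spec_suggest_skill_order (jd_text : String) (out : List String) : Prop := out = suggest_skill_order_alt jd_text
instance (jd_text : String) (out : List String) : Decidable (Spec_suggest_skill_order jd_text out) := by unfold Spec_suggest_skill_order; infer_instance

-- ===== CLAIM (what is proved, stated in full; the proofs are below) =====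
def Claim_equal_suggest_skill_order : Prop := ∀ (jd_text : String), Dom_suggest_skill_order jd_text → Spec_suggest_skill_order jd_text (suggest_skill_order jd_text)

-- ===== LEMMAS AND PROOFS =====

-- inserting past an element the comparison rejects
theorem insertBy_cons_of_not_before {α : Type} (before : α → α → Bool) (x y : α) (ys : List α)
    (h : before x y = false) :
    PySem.List.insertBy before x (y :: ys) = y :: PySem.List.insertBy before x ys := by
  simp [PySem.List.insertBy, h]

-- stable insertion of an element with the small (false) boolean key:
-- it lands right after the false-key block and in front of the true-key block
theorem insertBy_false_key {α : Type} (p : α → Bool) (x : α) (fs ts : List α)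
    (hx : p x = true) (hfs : ∀ y ∈ fs, p y = true) (hts : ∀ y ∈ ts, p y = false) :
    PySem.List.insertBy (fun a b => decide ((!p a) < (!p b))) x (fs ++ ts)
      = fs ++ x :: ts := by
  induction fs with
  | nil =>
    cases ts with
    | nil => simp [PySem.List.insertBy]
    | cons t ts' =>
      have ht : p t = false := hts t (by simp)
      simp [PySem.List.insertBy, hx, ht]
  | cons f fs' ih =>
    have hf : p f = true := hfs f (by simp)
    rw [List.cons_append, insertBy_cons_of_not_before _ _ _ _ (by simp [hx, hf]),
        ih (fun y hy => hfs y (by simp [hy]))]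
    simp

-- the heart of the equivalence: a stable sort on the boolean key ¬p is the p-partition
theorem sorted_not_key_eq_partition {α : Type} (p : α → Bool) (xs : List α) :
    PySem.List.sorted xs (fun x => !p x)
      = xs.filter p ++ xs.filter (fun x => !p x) := by
  rw [PySem.List.sorted_eq_foldl_insertBy]
  induction xs using List.reverseRecOn with
  | nil => simp
  | append_singleton xs x ih =>
    rw [List.foldl_append, List.foldl_cons, List.foldl_nil, ih]
    by_cases hx : p x = true
    · rw [insertBy_false_key p x _ _ hx
        (fun y hy => by simpa using List.of_mem_filter hy)
        (fun y hy => by simpa using List.of_mem_filter hy)]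
      simp [List.filter_append, hx]
    · have hx' : p x = false := by simpa using hx
      rw [PySem.List.insertBy_of_forall_not_before _ _ _ (by
        intro y hy; simp [hx'])]
      simp [List.filter_append, hx']

-- ===== VERDICT (by name: the statement is the Claim_ definition above) =====
theorem suggest_skill_order_spec : Claim_equal_suggest_skill_order := by
  intro jd_text _
  show _ = _
  unfold suggest_skill_order suggest_skill_order_alt
  dsimp only
  have hstep : (fun (acc : List String × List String) skill =>
      if PySem.Str.isIn (PySem.Str.lower skill) (PySem.Str.lower jd_text) then (acc.1 ++ [skill], acc.2)
      else (acc.1, acc.2 ++ [skill]))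
    = fun (s : List String × List String) e =>
      ((fun acc skill => if PySem.Str.isIn (PySem.Str.lower skill) (PySem.Str.lower jd_text) then acc ++ [skill] else acc) s.1 e,
       (fun acc skill => if PySem.Str.isIn (PySem.Str.lower skill) (PySem.Str.lower jd_text) then acc else acc ++ [skill]) s.2 e) := by
    funext acc skill
    by_cases h : PySem.Str.isIn (PySem.Str.lower skill) (PySem.Str.lower jd_text) = true
    · simp only [if_pos h]
    · simp only [if_neg h]
  rw [hstep, PySem.List.foldl_prod_mk
      (f := fun acc skill => if PySem.Str.isIn (PySem.Str.lower skill) (PySem.Str.lower jd_text) then acc ++ [skill] else acc)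
      (g := fun acc skill => if PySem.Str.isIn (PySem.Str.lower skill) (PySem.Str.lower jd_text) then acc else acc ++ [skill])]
  · rw [sorted_not_key_eq_partition (fun s => PySem.Str.isIn (PySem.Str.lower s) (PySem.Str.lower jd_text))]
    simp only [PySem.List.foldl_append_if_eq_filter, List.nil_append]
    congr 1
    have hfun : (fun (acc : List String) skill =>
        if PySem.Str.isIn (PySem.Str.lower skill) (PySem.Str.lower jd_text) then acc else acc ++ [skill])
      = fun acc skill =>
        if (!PySem.Str.isIn (PySem.Str.lower skill) (PySem.Str.lower jd_text)) = true then acc ++ [skill] else acc := by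
      funext acc skill
      by_cases h : PySem.Str.isIn (PySem.Str.lower skill) (PySem.Str.lower jd_text) = true
      · rw [if_pos h, if_neg (by simp only [h, Bool.not_true]; exact Bool.false_ne_true)]
      · have hx : PySem.Str.isIn (PySem.Str.lower skill) (PySem.Str.lower jd_text) = false := by
          cases hx : PySem.Str.isIn (PySem.Str.lower skill) (PySem.Str.lower jd_text) with
          | false => rfl
          | true => exact absurd hx h
        rw [if_neg h, if_pos (by rw [hx]; rfl)]
    rw [hfun, PySem.List.foldl_append_if_eq_filter]
    simp
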